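-- pv_equiv track=rewrite | github.com/BastienMonet/TestSAE | histoire2foot.py | liste_nbre_defaite
-- ===== SOURCE A (Python) =====
-- def liste_des_equipes(liste_matchs):
--     """retourne la liste des équipes qui ont participé aux matchs de la liste
--     Attention on ne veut voir apparaitre le nom de chaque équipe qu'une seule fois
--
--     Args:
--         liste_matchs (list): une liste de matchs
--
--     Returns:
--         list: une liste de str contenant le noms des équipes ayant jouer des matchs
--     """
--     rep=[]
--     for i in range(len(liste_matchs)):
--         if liste_matchs[i][1] not in rep:
--             rep.append(liste_matchs[i][1])
--         if liste_matchs[i][2] not in rep: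
--             rep.append(liste_matchs[i][2])
--     return rep
--
-- def equipe_perdente_liste(liste_matchs):
--     """retourne les noms des équipes qui ont Perdu un match. Si c'est un match nul on retourne 0
--
--     Args:
--         liste_match (tuple): une liste de matchs
--
--     Returns:
--         list: le nom des équipes gagnantes
--     """
--     res=[]
--     for i in range(len(liste_matchs)):
--         if liste_matchs[i][3]<liste_matchs[i][4]:
--             res.append(liste_matchs[i][1])
--         elif liste_matchs[i][3]>liste_matchs[i][4]:
--             res.append(liste_matchs[i][2])
--         else:
--             res.append(0)
--     return res
--
-- def liste_nbre_defaite(liste_matchs):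
--     """créer un liste qui retourne le nombre des défaites de chaque équipe
--
--     Args:
--         liste_matchs (list): Une liste des matchs
--
--     Returns:
--         Liste: Retourne le nombre des défaites de chaque équipe
--     """
--     defaite_equipe=[]
--     ind1 = 0
--     ind2 = 0
--     nbre_defaite=0
--     while ind1 < len(equipe_perdente_liste(liste_matchs)) and ind2 < len(liste_des_equipes(liste_matchs)):
--         if equipe_perdente_liste(liste_matchs)[ind1] == liste_des_equipes(liste_matchs)[ind2]:
--             nbre_defaite+=1
--         ind1+=1
--         if ind1 > len(equipe_perdente_liste(liste_matchs))-1: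
--             ind2+=1
--             defaite_equipe.append(nbre_defaite)
--             nbre_defaite=0
--             ind1=0
--     return defaite_equipe
-- ===== SOURCE B (Python) =====
-- def liste_nbre_defaite(liste_matchs):
--     """Nombre de defaites par equipe, dans l'ordre d'apparition des equipes.
--
--     Single pass: one insertion-ordered dict team -> loss count."""
--     counts = {}
--     for m in liste_matchs:
--         counts.setdefault(m[1], 0)
--         counts.setdefault(m[2], 0)
--         if m[3] < m[4]:
--             counts[m[1]] += 1
--         elif m[3] > m[4]:
--             counts[m[2]] += 1
--     return list(counts.values())
-- ===== Notes on version B (the rewrite author's own statement) =====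
-- stated objective: faster
-- what changed: A rebuilds the full teams list and losers list from scratch on every iteration of a quadratic two-index scan; B makes one pass over the matches with a single insertion-ordered dict team -> loss count and returns its values.
import Mathlib
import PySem

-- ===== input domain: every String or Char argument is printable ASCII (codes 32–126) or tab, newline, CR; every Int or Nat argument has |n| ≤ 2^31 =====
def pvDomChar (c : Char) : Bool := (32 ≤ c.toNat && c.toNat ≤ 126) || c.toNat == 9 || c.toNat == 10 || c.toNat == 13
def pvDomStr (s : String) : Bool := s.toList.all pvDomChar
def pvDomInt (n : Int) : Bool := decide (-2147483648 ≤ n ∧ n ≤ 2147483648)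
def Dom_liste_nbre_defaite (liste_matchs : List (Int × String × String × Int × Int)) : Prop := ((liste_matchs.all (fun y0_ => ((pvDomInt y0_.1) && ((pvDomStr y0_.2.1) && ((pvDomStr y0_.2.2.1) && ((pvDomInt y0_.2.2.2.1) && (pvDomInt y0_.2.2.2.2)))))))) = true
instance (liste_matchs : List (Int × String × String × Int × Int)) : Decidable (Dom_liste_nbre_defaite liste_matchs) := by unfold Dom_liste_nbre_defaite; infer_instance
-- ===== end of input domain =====

-- B replaces A's quadratic re-scanning (teams list and losers list rebuilt at every step of a
-- two-index while loop) by a single pass with one insertion-ordered dict team -> loss count.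


-- ===== PORT A =====
-- liste_des_equipes: list with 'not in' membership appends, in traversal order
def liste_des_equipes_port (liste_matchs : List (Int × String × String × Int × Int)) : List String :=
  liste_matchs.foldl (fun rep m =>
    let rep := if rep.contains m.2.1 then rep else rep ++ [m.2.1]
    if rep.contains m.2.2.1 then rep else rep ++ [m.2.2.1]) []

-- equipe_perdente_liste: Python appends the int 0 on a draw; ported as 'none' (the int 0 is
-- never == to a team-name string in Python, and 'none' is never equal to 'some t' here: exact)
def equipe_perdente_port (liste_matchs : List (Int × String × String × Int × Int)) : List (Option String) :=
  liste_matchs.foldl (fun res m =>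
    if m.2.2.2.1 < m.2.2.2.2 then res ++ [some m.2.1]
    else if m.2.2.2.1 > m.2.2.2.2 then res ++ [some m.2.2.1]
    else res ++ [none]) []

-- the while loop of liste_nbre_defaite, step for step (both indices always in range when read)
def loopA (losers : List (Option String)) (teams : List String)
    (acc : List Int) (ind1 ind2 : Nat) (nbre : Int) : List Int :=
  if h : ind1 < losers.length ∧ ind2 < teams.length then
    let nbre' := if losers[ind1]'h.1 = some (teams[ind2]'h.2) then nbre + 1 else nbre
    let ind1' := ind1 + 1
    if ind1' > losers.length - 1 then
      loopA losers teams (acc ++ [nbre']) 0 (ind2 + 1) 0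
    else
      loopA losers teams acc ind1' ind2 nbre'
  else acc
termination_by (teams.length - ind2, losers.length - ind1)
decreasing_by
  · exact Prod.Lex.left _ _ (by omega)
  · exact Prod.Lex.right _ (by omega)

def liste_nbre_defaite (liste_matchs : List (Int × String × String × Int × Int)) : List Int :=
  loopA (equipe_perdente_port liste_matchs) (liste_des_equipes_port liste_matchs) [] 0 0 0

-- ===== PORT B =====
-- loop body of B's single pass (counts.setdefault then the score comparison)
def stepB (counts : PySem.Dict String Int) (m : Int × String × String × Int × Int) : PySem.Dict String Int :=
  let counts := counts.setdefault m.2.1 0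
  let counts := counts.setdefault m.2.2.1 0
  if m.2.2.2.1 < m.2.2.2.2 then counts.modify m.2.1 0 (· + 1)
  else if m.2.2.2.1 > m.2.2.2.2 then counts.modify m.2.2.1 0 (· + 1)
  else counts


def liste_nbre_defaite_alt (liste_matchs : List (Int × String × String × Int × Int)) : List Int :=
  (liste_matchs.foldl stepB PySem.Dict.empty).values

-- ===== PRECONDITION & SPEC =====
def Spec_liste_nbre_defaite (liste_matchs : List (Int × String × String × Int × Int)) (out : List Int) : Prop := out = liste_nbre_defaite_alt liste_matchs
instance (liste_matchs : List (Int × String × String × Int × Int)) (out : List Int) : Decidable (Spec_liste_nbre_defaite liste_matchs out) := by unfold Spec_liste_nbre_defaite; infer_instance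

-- ===== CLAIM (what is proved, stated in full; the proofs are below) =====
def Claim_equal_liste_nbre_defaite : Prop := ∀ (liste_matchs : List (Int × String × String × Int × Int)), Dom_liste_nbre_defaite liste_matchs → Spec_liste_nbre_defaite liste_matchs (liste_nbre_defaite liste_matchs)

-- ===== LEMMAS AND PROOFS =====

-- canonical descriptions of A's two intermediate lists
def teamsList (ms : List (Int × String × String × Int × Int)) : List String :=
  ms.flatMap (fun m => [m.2.1, m.2.2.1])

def loserOf (m : Int × String × String × Int × Int) : Option String :=
  if m.2.2.2.1 < m.2.2.2.2 then some m.2.1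
  else if m.2.2.2.1 > m.2.2.2.2 then some m.2.2.1
  else none

lemma equipe_perdente_eq_map (ms : List (Int × String × String × Int × Int)) :
    equipe_perdente_port ms = ms.map loserOf := by
  suffices h : ∀ acc, ms.foldl (fun res m =>
      if m.2.2.2.1 < m.2.2.2.2 then res ++ [some m.2.1]
      else if m.2.2.2.1 > m.2.2.2.2 then res ++ [some m.2.2.1]
      else res ++ [none]) acc = acc ++ ms.map loserOf by
    simpa using h []
  induction ms with
  | nil => simp
  | cons m ms ih =>
    intro acc
    simp only [List.foldl_cons, List.map_cons, ih]
    unfold loserOf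
    split_ifs <;> simp

lemma liste_des_equipes_eq_set (ms : List (Int × String × String × Int × Int)) :
    liste_des_equipes_port ms = PySem.Set.ofList (teamsList ms) := by
  suffices h : ∀ rep, ms.foldl (fun rep m =>
      let rep := if rep.contains m.2.1 then rep else rep ++ [m.2.1]
      if rep.contains m.2.2.1 then rep else rep ++ [m.2.2.1]) rep
      = PySem.Set.update rep (teamsList ms) by
    simpa [liste_des_equipes_port, PySem.Set.update_nil_left] using h []
  induction ms with
  | nil => simp [teamsList, PySem.Set.update]
  | cons m ms ih =>
    intro rep
    simp only [List.foldl_cons, ih]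
    have h1 : teamsList (m :: ms) = m.2.1 :: m.2.2.1 :: teamsList ms := by
      simp [teamsList]
    rw [h1, PySem.Set.update_cons, PySem.Set.update_cons]
    rfl

lemma getD_setdefault_zero (d : PySem.Dict String Int) (k t : String) :
    (d.setdefault k 0).getD t 0 = d.getD t 0 := by
  by_cases hc : d.contains k = true
  · rw [PySem.Dict.setdefault_of_contains _ 0 hc]
  · rw [PySem.Dict.setdefault_of_not_contains _ 0 (by simpa using hc), PySem.Dict.getD_insert]
    split_ifs with he
    · rw [he, PySem.Dict.getD_of_not_contains _ 0 (by simpa using hc)]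
    · rfl

lemma keys_setdefault_zero (d : PySem.Dict String Int) (k : String) :
    (d.setdefault k 0).keys = PySem.Set.add d.keys k := by
  by_cases hc : d.contains k = true
  · rw [PySem.Dict.setdefault_of_contains _ 0 hc, PySem.Set.add]
    have : k ∈ d.keys := (PySem.Dict.contains_iff_mem_keys d k).mp hc
    simp [PySem.Set.contains, this]
  · rw [PySem.Dict.setdefault_of_not_contains _ 0 (by simpa using hc),
        PySem.Dict.keys_insert_of_not_contains _ 0 (by simpa using hc), PySem.Set.add]
    have : ¬ k ∈ d.keys := fun hm => hc ((PySem.Dict.contains_iff_mem_keys d k).mpr hm)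
    simp [PySem.Set.contains, this]

lemma stepB_getD (d : PySem.Dict String Int) (m : Int × String × String × Int × Int) (t : String) :
    (stepB d m).getD t 0 = d.getD t 0 + (if loserOf m == some t then (1 : Int) else 0) := by
  unfold loserOf
  by_cases hlt : m.2.2.2.1 < m.2.2.2.2
  · simp only [stepB, if_pos hlt]
    rw [PySem.Dict.getD_modify]
    by_cases ht : t = m.2.1
    · rw [if_pos ht, getD_setdefault_zero, getD_setdefault_zero, ht]; simp
    · rw [if_neg ht, getD_setdefault_zero, getD_setdefault_zero]; simp [Ne.symm ht]
  · by_cases hgt : m.2.2.2.1 > m.2.2.2.2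
    · simp only [stepB, if_neg hlt, if_pos hgt]
      rw [PySem.Dict.getD_modify]
      by_cases ht : t = m.2.2.1
      · rw [if_pos ht, getD_setdefault_zero, getD_setdefault_zero, ht]; simp
      · rw [if_neg ht, getD_setdefault_zero, getD_setdefault_zero]; simp [Ne.symm ht]
    · simp only [stepB, if_neg hlt, if_neg hgt]
      rw [getD_setdefault_zero, getD_setdefault_zero]
      simp

lemma stepB_keys (d : PySem.Dict String Int) (m : Int × String × String × Int × Int) :
    (stepB d m).keys = PySem.Set.add (PySem.Set.add d.keys m.2.1) m.2.2.1 := by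
  by_cases hlt : m.2.2.2.1 < m.2.2.2.2
  · simp only [stepB, if_pos hlt]
    rw [PySem.Dict.keys_modify,
        PySem.Dict.keys_insert_of_contains _ _ (by
          rw [PySem.Dict.contains_iff_mem_keys, keys_setdefault_zero, keys_setdefault_zero]
          simp [PySem.Set.mem_add]),
        keys_setdefault_zero, keys_setdefault_zero]
  · by_cases hgt : m.2.2.2.1 > m.2.2.2.2
    · simp only [stepB, if_neg hlt, if_pos hgt]
      rw [PySem.Dict.keys_modify,
          PySem.Dict.keys_insert_of_contains _ _ (by
            rw [PySem.Dict.contains_iff_mem_keys, keys_setdefault_zero, keys_setdefault_zero]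
            simp [PySem.Set.mem_add]),
          keys_setdefault_zero, keys_setdefault_zero]
    · simp only [stepB, if_neg hlt, if_neg hgt]
      rw [keys_setdefault_zero, keys_setdefault_zero]

lemma fold_getD (ms : List (Int × String × String × Int × Int))
    (d : PySem.Dict String Int) (t : String) :
    (ms.foldl stepB d).getD t 0 = d.getD t 0 + ((ms.map loserOf).count (some t) : Int) := by
  induction ms generalizing d with
  | nil => simp
  | cons m ms ih =>
    simp only [List.foldl_cons, List.map_cons, List.count_cons, ih, stepB_getD]
    split_ifs <;> push_cast <;> ring

lemma fold_keys (ms : List (Int × String × String × Int × Int))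
    (d : PySem.Dict String Int) :
    (ms.foldl stepB d).keys = PySem.Set.update d.keys (teamsList ms) := by
  induction ms generalizing d with
  | nil => simp [teamsList, PySem.Set.update]
  | cons m ms ih =>
    have hteams : teamsList (m :: ms) = m.2.1 :: m.2.2.1 :: teamsList ms := by
      simp [teamsList]
    simp only [List.foldl_cons, ih, stepB_keys]
    rw [hteams, PySem.Set.update_cons, PySem.Set.update_cons]

lemma alt_eq_map (ms : List (Int × String × String × Int × Int)) :
    liste_nbre_defaite_alt ms =
      (PySem.Set.ofList (teamsList ms)).map (fun t => ((ms.map loserOf).count (some t) : Int)) := by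
  unfold liste_nbre_defaite_alt
  have hkeys := fold_keys ms PySem.Dict.empty
  rw [PySem.Dict.keys_empty, PySem.Set.update_nil_left] at hkeys
  rw [PySem.Dict.values_eq_map_keys _ (by rw [hkeys]; exact PySem.Set.nodup_ofList _) 0, hkeys]
  apply List.map_congr_left
  intro t _
  rw [fold_getD, PySem.Dict.getD_empty]
  ring

-- A's while loop: the inner index pass accumulates the count of the current team in the losers list
lemma loopA_inner (losers : List (Option String)) (teams : List String) (ind2 : Nat)
    (h2 : ind2 < teams.length) :
    ∀ k ind1 nbre acc, losers.length - ind1 = k → ind1 < losers.length →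
    loopA losers teams acc ind1 ind2 nbre =
      loopA losers teams
        (acc ++ [nbre + ((losers.drop ind1).count (some (teams[ind2]'h2)) : Int)])
        0 (ind2 + 1) 0 := by
  intro k
  induction k with
  | zero => intro ind1 nbre acc hk h1; omega
  | succ k ih =>
    intro ind1 nbre acc hk h1
    rw [loopA, dif_pos ⟨h1, h2⟩]
    have hdrop : losers.drop ind1 = losers[ind1] :: losers.drop (ind1 + 1) :=
      List.drop_eq_getElem_cons h1
    by_cases hlast : ind1 + 1 > losers.length - 1
    · have hend : losers.drop (ind1 + 1) = [] := by
        apply List.drop_eq_nil_of_le; omega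
      rw [if_pos hlast, hdrop, hend]
      simp only [List.count_cons, List.count_nil]
      split_ifs with he <;> simp_all
    · rw [if_neg hlast, ih (ind1 + 1) _ acc (by omega) (by omega), hdrop]
      simp only [List.count_cons]
      congr 2
      split_ifs with he <;> simp_all <;> ring

lemma loopA_outer (losers : List (Option String)) (teams : List String)
    (hl : losers ≠ []) :
    ∀ k ind2 acc, teams.length - ind2 = k →
    loopA losers teams acc 0 ind2 0 =
      acc ++ (teams.drop ind2).map (fun t => (losers.count (some t) : Int)) := by
  intro k
  induction k with
  | zero =>
    intro ind2 acc hk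
    rw [loopA, dif_neg (by omega), List.drop_eq_nil_of_le (by omega)]
    simp
  | succ k ih =>
    intro ind2 acc hk
    have h2 : ind2 < teams.length := by omega
    rw [loopA_inner losers teams ind2 h2 losers.length 0 0 acc rfl
          (by cases losers <;> simp_all),
        ih (ind2 + 1) _ (by omega), List.drop_eq_getElem_cons h2]
    simp only [List.drop_zero, List.map_cons, List.append_assoc, List.singleton_append, zero_add]

-- ===== VERDICT (by name: the statement is the Claim_ definition above) =====
theorem liste_nbre_defaite_spec : Claim_equal_liste_nbre_defaite := by
  intro ms _
  unfold Spec_liste_nbre_defaite liste_nbre_defaite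
  rw [alt_eq_map, equipe_perdente_eq_map, liste_des_equipes_eq_set]
  cases ms with
  | nil => rw [loopA]; simp [teamsList, PySem.Set.ofList]
  | cons m rest =>
    rw [loopA_outer _ _ (by simp) _ 0 [] rfl]
    simp
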